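-- pv_equiv track=rewrite | github.com/InderdeepSync/algoexpert_problems | ambiguous_measurements.py | inner
-- ===== SOURCE A (Python) =====
-- def inner(cups, low, high):
--     if not cups:
--         return False
--
--     cup = cups[0]
--     cupL, cupH = cup
--
--     res = False
--     while low >= 0 and high > 0:
--         res = res or inner(cups[1:], low, high)
--         low -= cupL
--         high -= cupH
--
--     return res or (low <= 0 and high >= 0)
-- ===== SOURCE B (Python) =====
-- def inner(cups, low, high):
--     n = len(cups)
--     memo = {}
--
--     def solve(i, l, h):
--         if i == n:
--             return False
--         key = (i, l, h)
--         if key in memo: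
--             return memo[key]
--         a, b = cups[i]
--         res = False
--         while l >= 0 and h > 0:
--             res = res or solve(i + 1, l, h)
--             l -= a
--             h -= b
--         res = res or (l <= 0 and h >= 0)
--         memo[key] = res
--         return res
--
--     return solve(0, low, high)
-- ===== Notes on version B (the rewrite author's own statement) =====
-- stated objective: alternative
-- what changed: B replaces A's naive recursion (which re-slices the list and re-solves identical subproblems) with index-based recursion memoized on the state (cup index, low, high) in a dictionary; it avoids recomputation when subproblem states repeat, but is not measurably faster on the benchmark inputs.
import Mathlib
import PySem

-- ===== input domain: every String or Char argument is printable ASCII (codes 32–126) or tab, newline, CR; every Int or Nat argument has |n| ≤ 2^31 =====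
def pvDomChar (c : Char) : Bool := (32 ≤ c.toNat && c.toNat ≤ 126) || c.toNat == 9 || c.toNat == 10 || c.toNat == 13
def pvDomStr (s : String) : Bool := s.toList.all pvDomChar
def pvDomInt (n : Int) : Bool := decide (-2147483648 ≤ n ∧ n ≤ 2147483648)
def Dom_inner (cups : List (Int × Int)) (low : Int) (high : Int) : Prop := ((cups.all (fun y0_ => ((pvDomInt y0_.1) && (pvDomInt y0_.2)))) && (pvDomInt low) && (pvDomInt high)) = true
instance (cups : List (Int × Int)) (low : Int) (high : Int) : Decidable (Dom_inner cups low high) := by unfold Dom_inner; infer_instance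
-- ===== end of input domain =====

-- B memoizes A's recursion on the state (cup index, low, high) in a dictionary; same return value.

-- ===== PORT A =====
-- A's while loop: res accumulates inner(cups[1:], low, high) over multiples of the first cup.
-- The inner 'if h2' branch is a totality guard only: when the cup is (≤0, ≤0) and the loop
-- condition holds, the Python while loop never terminates, so no return value is claimed there.
def innerLoop (f : Int → Int → Bool) (a b : Int) (res : Bool) (low high : Int) : Bool :=
  if h1 : 0 ≤ low ∧ 0 < high then
    if h2 : 0 < a ∨ 0 < b then
      innerLoop f a b (res || f low high) (low - a) (high - b)
    else res || decide (low ≤ 0 ∧ 0 ≤ high)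
  else res || decide (low ≤ 0 ∧ 0 ≤ high)
termination_by if 0 < a then (low + 1).toNat else high.toNat
decreasing_by rcases h2 with ha | hb <;> split_ifs <;> omega

def inner (cups : List (Int × Int)) (low : Int) (high : Int) : Bool :=
  match cups with
  | [] => false
  | (a, b) :: rest => innerLoop (fun l h => inner rest l h) a b false low high

-- ===== PORT B =====
-- B's memo dictionary, keyed by (cup index, low, high).
-- The same while loop, threading the memo through the recursive calls; 'res or solve(...)'
-- short-circuits, so the call is skipped once res is true.  The 'if h2' branch is the same
-- totality guard as in port A (the Python loop diverges there too).
def altLoop (f : Int → Int → PySem.Dict (Nat × Int × Int) Bool → Bool × PySem.Dict (Nat × Int × Int) Bool)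
    (a b : Int) (res : Bool) (low high : Int) (m : PySem.Dict (Nat × Int × Int) Bool) :
    Bool × Int × Int × PySem.Dict (Nat × Int × Int) Bool :=
  if h1 : 0 ≤ low ∧ 0 < high then
    if h2 : 0 < a ∨ 0 < b then
      let p := if res then (true, m) else f low high m
      altLoop f a b (res || p.1) (low - a) (high - b) p.2
    else (res, low, high, m)
  else (res, low, high, m)
termination_by if 0 < a then (low + 1).toNat else high.toNat
decreasing_by rcases h2 with ha | hb <;> split_ifs <;> omega

-- def solve(i, l, h) of Source B
def altSolve (cups : List (Int × Int)) (i : Nat) (low high : Int)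
    (m : PySem.Dict (Nat × Int × Int) Bool) : Bool × PySem.Dict (Nat × Int × Int) Bool :=
  if hn : cups.length ≤ i then (false, m)
  else
    match m.get? (i, low, high) with
    | some v => (v, m)
    | none =>
      let c := cups[i]'(by omega)
      let q := altLoop (fun l h mm => altSolve cups (i + 1) l h mm) c.1 c.2 false low high m
      let r := q.1 || decide (q.2.1 ≤ 0 ∧ 0 ≤ q.2.2.1)
      (r, q.2.2.2.insert (i, low, high) r)
termination_by cups.length - i
decreasing_by omega

def inner_alt (cups : List (Int × Int)) (low : Int) (high : Int) : Bool :=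
  (altSolve cups 0 low high PySem.Dict.empty).1

-- ===== PRECONDITION & SPEC =====
def Spec_inner (cups : List (Int × Int)) (low : Int) (high : Int) (out : Bool) : Prop := out = inner_alt cups low high
instance (cups : List (Int × Int)) (low : Int) (high : Int) (out : Bool) : Decidable (Spec_inner cups low high out) := by unfold Spec_inner; infer_instance

-- ===== CLAIM (what is proved, stated in full; the proofs are below) =====
def Claim_equal_inner : Prop := ∀ (cups : List (Int × Int)) (low : Int) (high : Int), Dom_inner cups low high → Spec_inner cups low high (inner cups low high)

-- ===== LEMMAS AND PROOFS =====

-- Invariant: every memo entry stores the A-value of its state.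
def MemoOK (cups : List (Int × Int)) (m : PySem.Dict (Nat × Int × Int) Bool) : Prop :=
  ∀ k v, m.get? k = some v → v = inner (cups.drop k.1) k.2.1 k.2.2

theorem altLoop_eq (cups : List (Int × Int))
    (f : Int → Int → PySem.Dict (Nat × Int × Int) Bool → Bool × PySem.Dict (Nat × Int × Int) Bool)
    (g : Int → Int → Bool)
    (HF : ∀ l h m, MemoOK cups m → (f l h m).1 = g l h ∧ MemoOK cups (f l h m).2)
    (a b : Int) (res : Bool) (low high : Int) (m : PySem.Dict (Nat × Int × Int) Bool) :
    MemoOK cups m →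
      ((altLoop f a b res low high m).1
          || decide ((altLoop f a b res low high m).2.1 ≤ 0 ∧ 0 ≤ (altLoop f a b res low high m).2.2.1))
        = innerLoop g a b res low high
      ∧ MemoOK cups (altLoop f a b res low high m).2.2.2 := by
  fun_induction altLoop f a b res low high m with
  | case1 res low high m h1 h2 p ih =>
    intro hm
    have hmp : MemoOK cups p.2 ∧ (res || p.1) = (res || g low high) := by
      by_cases hres : res = true
      · simp only [p, hres, dif_pos]
        exact ⟨hm, by simp⟩
      · obtain ⟨e, hok⟩ := HF low high m hm
        simp only [p, dif_neg hres]
        exact ⟨hok, by rw [e]⟩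
    obtain ⟨e1, hok1⟩ := ih hmp.1
    rw [innerLoop, dif_pos h1, dif_pos h2, ← hmp.2]
    exact ⟨e1, hok1⟩
  | case2 res low high m h1 h2 =>
    intro hm
    rw [innerLoop, dif_pos h1, dif_neg h2]
    exact ⟨rfl, hm⟩
  | case3 res low high m h1 =>
    intro hm
    rw [innerLoop, dif_neg h1]
    exact ⟨rfl, hm⟩

theorem inner_cons (c : Int × Int) (rest : List (Int × Int)) (low high : Int) :
    inner (c :: rest) low high = innerLoop (fun l h => inner rest l h) c.1 c.2 false low high := by
  obtain ⟨a, b⟩ := c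
  rfl

theorem altSolve_eq (cups : List (Int × Int)) (i : Nat) (low high : Int)
    (m : PySem.Dict (Nat × Int × Int) Bool) :
    MemoOK cups m →
      (altSolve cups i low high m).1 = inner (cups.drop i) low high
      ∧ MemoOK cups (altSolve cups i low high m).2 := by
  fun_induction altSolve cups i low high m with
  | case1 i low high m hn =>
    intro hm
    rw [List.drop_eq_nil_of_le hn]
    exact ⟨rfl, hm⟩
  | case2 i low high m hn v heq =>
    intro hm
    exact ⟨hm _ _ heq, hm⟩
  | case3 i low high m hn heq c q r ih =>
    intro hm
    have hd : cups.drop i = cups[i]'(by omega) :: cups.drop (i + 1) :=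
      List.drop_eq_getElem_cons (by omega)
    have HF : ∀ l h mm, MemoOK cups mm →
        (altSolve cups (i + 1) l h mm).1 = inner (cups.drop (i + 1)) l h
        ∧ MemoOK cups (altSolve cups (i + 1) l h mm).2 := fun l h mm => ih l h mm
    obtain ⟨E, Hok⟩ :=
      altLoop_eq cups (fun l h mm => altSolve cups (i + 1) l h mm)
        (fun l h => inner (cups.drop (i + 1)) l h) HF c.1 c.2 false low high m hm
    have hr : r = inner (cups.drop i) low high := by
      rw [hd, inner_cons]
      exact E
    refine ⟨hr, ?_⟩
    intro k v hv
    rw [PySem.Dict.get?_insert] at hv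
    by_cases hk : k = (i, low, high)
    · rw [if_pos hk] at hv
      cases hv
      rw [hk]
      exact hr
    · rw [if_neg hk] at hv
      exact Hok k v hv

-- ===== VERDICT (by name: the statement is the Claim_ definition above) =====
theorem inner_spec : Claim_equal_inner := by
  intro cups low high _
  unfold Spec_inner inner_alt
  have h := altSolve_eq cups 0 low high PySem.Dict.empty (by
    intro k v hv; simp [PySem.Dict.get?_empty] at hv)
  simpa using h.1.symm
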